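-- pv_equiv track=rewrite | github.com/sbyakod/TJHSST | Cryptography/Caesar-Shifts-and-Substitution-Ciphers-2/main.py | frequent_double_letters
-- ===== SOURCE A (Python) =====
-- from collections import Counter
--
-- def prepare_string(s, alphabet):
--   temp = s
--   for char in s:
--     if char not in alphabet:
--       temp = temp.replace(char, "")
--   return temp
--
-- def frequent_double_letters(text):
--   """ return a list of tuples of most common double letters in 'text'"""
--   text = prepare_string(text, alphabet)
--   doubles = []
--   for index in range(len(text) - 1):
--     if text[index] == text[index + 1]:
--       doubles.append(text[index:index + 2])
--   c = Counter(doubles)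
--   return c.most_common(5)
--
-- alphabet = "ABCDEFGHIJKLMNOPQRSTUVWXYZ"
-- ===== SOURCE B (Python) =====
-- from collections import Counter
--
-- alphabet = "ABCDEFGHIJKLMNOPQRSTUVWXYZ"
--
-- def frequent_double_letters(text):
--     """ return a list of tuples of most common double letters in 'text'"""
--     # single filtering pass instead of repeated str.replace scans
--     filtered = [c for c in text if c in alphabet]
--     counter = Counter()
--     # run-length scan: a run of length L contributes L-1 adjacent equal pairs
--     i, n = 0, len(filtered)
--     while i < n:
--         j = i + 1
--         while j < n and filtered[j] == filtered[i]:
--             j += 1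
--         if j - i > 1:
--             counter[filtered[i] * 2] += j - i - 1
--         i = j
--     return counter.most_common(5)
-- ===== Notes on version B (the rewrite author's own statement) =====
-- stated objective: faster
-- what changed: Replaces the quadratic repeated str.replace filtering with one filtering pass, and replaces the adjacent-index pair scan that appends one two-character string per pair with a run-length two-pointer scan that adds L-1 to the counter per run of length L; ties in most_common are preserved because runs are met in the same first-occurrence order.
import Mathlib
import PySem

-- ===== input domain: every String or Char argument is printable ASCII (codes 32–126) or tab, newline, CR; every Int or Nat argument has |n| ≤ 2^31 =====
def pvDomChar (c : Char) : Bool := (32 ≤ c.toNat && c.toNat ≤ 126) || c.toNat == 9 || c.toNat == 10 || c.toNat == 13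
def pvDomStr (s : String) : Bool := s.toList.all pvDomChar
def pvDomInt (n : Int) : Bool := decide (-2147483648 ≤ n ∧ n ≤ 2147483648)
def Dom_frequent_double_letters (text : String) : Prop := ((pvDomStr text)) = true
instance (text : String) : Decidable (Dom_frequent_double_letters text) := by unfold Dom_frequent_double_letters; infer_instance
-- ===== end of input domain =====

-- B replaces A's repeated str.replace filtering and adjacent-index pair scan with one
-- filtering pass and a run-length scan adding L-1 per run (objective: faster).

-- ===== PORT A =====
def pvAlphabet : String := "ABCDEFGHIJKLMNOPQRSTUVWXYZ"

def prepare_string (s : String) (alphabet : String) : String :=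
  s.toList.foldl
    (fun temp char =>
      if !(PySem.Str.isIn (String.ofList [char]) alphabet) then
        PySem.Str.replace temp (String.ofList [char]) ""
      else temp) s

def frequent_double_letters (text : String) : List (String × Int) :=
  let text := prepare_string text pvAlphabet
  let doubles := (PySem.List.pyRange 0 (PySem.Str.len text - 1) 1).foldl
    (fun doubles index =>
      if PySem.Str.pyGet? text index == PySem.Str.pyGet? text (index + 1) then
        doubles ++ [PySem.Str.slice text (some index) (some (index + 2))]
      else doubles) []
  -- Counter(doubles).most_common(5) = sorted(items, key=count, reverse=True)[:5] (documented, stable)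
  (PySem.List.sorted (PySem.Dict.counter doubles).items (fun p => p.2) true).take 5

-- ===== PORT B =====
-- the two-pointer while loops of Source B: one run (head extent) per step
def pvRuns : List Char → List (Char × Nat)
  | [] => []
  | c :: rest =>
    (c, (rest.takeWhile (· == c)).length + 1) :: pvRuns (rest.dropWhile (· == c))
  termination_by l => l.length
  decreasing_by simpa using Nat.lt_succ_of_le (List.length_dropWhile_le _ _)

def frequent_double_letters_alt (text : String) : List (String × Int) :=
  let filtered := text.toList.filter (fun c => PySem.Str.isIn (String.ofList [c]) pvAlphabet)
  let counter := (pvRuns filtered).foldl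
    (fun counter r =>
      if 1 < r.2 then counter.modify (String.ofList [r.1, r.1]) 0 (· + ((r.2 : Int) - 1))
      else counter)
    PySem.Dict.empty
  -- counter.most_common(5) = sorted(items, key=count, reverse=True)[:5] (documented, stable)
  (PySem.List.sorted counter.items (fun p => p.2) true).take 5

-- ===== PRECONDITION & SPEC =====
def Spec_frequent_double_letters (text : String) (out : List (String × Int)) : Prop :=
  out = frequent_double_letters_alt text
instance (text : String) (out : List (String × Int)) : Decidable (Spec_frequent_double_letters text out) := by
  unfold Spec_frequent_double_letters; infer_instance

-- ===== CLAIM (what is proved, stated in full; the proofs are below) =====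
def Claim_equal_frequent_double_letters : Prop :=
  ∀ (text : String), Dom_frequent_double_letters text →
    Spec_frequent_double_letters text (frequent_double_letters text)

-- ===== LEMMAS AND PROOFS =====

-- membership test both programs use
def pvP (c : Char) : Bool := PySem.Str.isIn (String.ofList [c]) pvAlphabet

-- str.replace(c, "") removes every occurrence of the character c
theorem pvGo (c : Char) : ∀ (l acc : List Char) (fuel : Nat), l.length ≤ fuel →
    PySem.Chars.replace.go [c] [] fuel l acc = acc.reverse ++ l.filter (fun x => !(x == c)) := by
  intro l
  induction l with
  | nil =>
    intro acc fuel _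
    cases fuel with
    | zero => rw [PySem.Chars.replace.go]; simp
    | succ n => rw [PySem.Chars.replace.go]; simp; omega
  | cons x t ih =>
    intro acc fuel h
    cases fuel with
    | zero => simp at h
    | succ f =>
      rw [PySem.Chars.replace.go]
      by_cases hx : x = c
      · subst hx
        have hpre : [x].isPrefixOf (x :: t) = true := by simp [List.isPrefixOf]
        simp [hpre]
        exact ih acc f (by simpa using h)
      · have hpre : [c].isPrefixOf (x :: t) = false := by
          simp [List.isPrefixOf]; exact fun hc => absurd hc.symm hx
        simp only [hpre]
        rw [if_neg (by simp)]
        rw [ih _ f (by simpa using h)]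
        simp [hx]

theorem pvReplace (l : List Char) (c : Char) :
    PySem.Chars.replace l [c] [] = l.filter (fun x => !(x == c)) := by
  rw [PySem.Chars.replace]
  rw [if_neg (by simp : ¬ ([c] : List Char).isEmpty = true)]
  rw [pvGo c l [] l.length le_rfl]
  simp

theorem pvPrepLoop (cs : List Char) : ∀ (s : String),
    (cs.foldl (fun temp char =>
      if !(PySem.Str.isIn (String.ofList [char]) pvAlphabet) then
        PySem.Str.replace temp (String.ofList [char]) ""
      else temp) s).toList
    = s.toList.filter (fun x => pvP x || !(cs.contains x)) := by
  induction cs with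
  | nil => intro s; simp
  | cons c cs ih =>
    intro s
    simp only [List.foldl_cons]
    by_cases hP : pvP c
    · rw [if_neg (by simp [pvP] at hP ⊢; exact hP)]
      rw [ih s]
      apply List.filter_congr
      intro x _
      by_cases hxc : x = c
      · subst hxc; simp [hP]
      · simp [hxc]
    · rw [if_pos (by simp [pvP] at hP ⊢; exact hP)]
      rw [ih _]
      have hrep : (PySem.Str.replace s (String.ofList [c]) "").toList
          = s.toList.filter (fun x => !(x == c)) := by
        rw [PySem.Str.toList_replace]
        simp only [String.toList_ofList]
        have : ("" : String).toList = [] := rfl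
        rw [this, pvReplace]
      rw [hrep, List.filter_filter]
      apply List.filter_congr
      intro x _
      by_cases hxc : x = c
      · subst hxc
        simp [pvP] at hP
        simp [pvP, hP]
      · simp [hxc]

theorem pvPrepare_toList (s : String) :
    (prepare_string s pvAlphabet).toList = s.toList.filter pvP := by
  unfold prepare_string
  rw [pvPrepLoop]
  apply List.filter_congr
  intro x hx
  have hc : s.toList.contains x = true := by simpa using hx
  simp only [hc, Bool.not_true, Bool.or_false]

-- the adjacent-equal pairs of a character list, as the two-character strings A collects
def pvPairs : List Char → List String
  | a :: b :: rest => (if a == b then [String.ofList [a, b]] else []) ++ pvPairs (b :: rest)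
  | _ => []

theorem pvPairs_eq_ranges (l : List Char) :
    ((List.range (l.length - 1)).filter (fun k => l[k]? == l[k+1]?)).map
      (fun k => String.ofList ((l.drop k).take 2)) = pvPairs l := by
  induction l with
  | nil => simp [pvPairs]
  | cons a tail ih =>
    cases tail with
    | nil => simp [pvPairs]
    | cons b r =>
      simp only [List.length_cons, Nat.add_sub_cancel] at ih
      have hlen : (a :: b :: r).length - 1 = r.length + 1 := by simp
      rw [hlen, List.range_succ_eq_map, List.filter_cons, List.filter_map]
      have hshift : ((List.range r.length).filter ((fun k => (a :: b :: r)[k]? == (a :: b :: r)[k+1]?) ∘ Nat.succ))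
          = (List.range r.length).filter (fun k => (b :: r)[k]? == (b :: r)[k+1]?) := by
        apply List.filter_congr; intro k _; simp
      by_cases hab : a == b
      · have h0 : ((a :: b :: r)[0]? == (a :: b :: r)[0+1]?) = true := by simp [hab]
        rw [if_pos h0]
        simp only [List.map_cons, List.map_map, hshift]
        have hmap : ((List.range r.length).filter (fun k => (b :: r)[k]? == (b :: r)[k+1]?)).map
            ((fun k => String.ofList (((a :: b :: r).drop k).take 2)) ∘ Nat.succ)
            = ((List.range r.length).filter (fun k => (b :: r)[k]? == (b :: r)[k+1]?)).map
              (fun k => String.ofList (((b :: r).drop k).take 2)) := by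
          apply List.map_congr_left; intro k _; simp
        rw [hmap, ih]
        have hab' : a = b := by simpa using hab
        simp [pvPairs, hab']
      · have hne : ¬ a = b := by simpa using hab
        rw [if_neg (by simp; exact hne)]
        simp only [List.map_map, hshift]
        have hmap : ((List.range r.length).filter (fun k => (b :: r)[k]? == (b :: r)[k+1]?)).map
            ((fun k => String.ofList (((a :: b :: r).drop k).take 2)) ∘ Nat.succ)
            = ((List.range r.length).filter (fun k => (b :: r)[k]? == (b :: r)[k+1]?)).map
              (fun k => String.ofList (((b :: r).drop k).take 2)) := by
          apply List.map_congr_left; intro k _; simp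
        rw [hmap, ih]
        simp [pvPairs, hne]

theorem pvDoubles (t : String) :
    (PySem.List.pyRange 0 (PySem.Str.len t - 1) 1).foldl
      (fun doubles index =>
        if PySem.Str.pyGet? t index == PySem.Str.pyGet? t (index + 1) then
          doubles ++ [PySem.Str.slice t (some index) (some (index + 2))]
        else doubles) []
    = pvPairs t.toList := by
  rw [PySem.List.foldl_append_if
    (p := fun index => PySem.Str.pyGet? t index == PySem.Str.pyGet? t (index + 1))
    (f := fun index => PySem.Str.slice t (some index) (some (index + 2)))]
  rw [PySem.List.pyRange_one, PySem.Str.len_eq]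
  have htn : ((t.toList.length : Int) - 1 - 0).toNat = t.toList.length - 1 := by omega
  rw [htn, List.filter_map, List.map_map, List.nil_append]
  have hPf : ((fun index => PySem.Str.pyGet? t index == PySem.Str.pyGet? t (index + 1))
        ∘ fun (k : Nat) => (0 : Int) + (k : Int))
      = fun (k : Nat) => t.toList[k]? == t.toList[k+1]? := by
    funext k
    simp only [Function.comp_apply, zero_add]
    have h1 : (k : Int) + 1 = ((k + 1 : Nat) : Int) := by push_cast; ring
    rw [h1, PySem.Str.pyGet?_natCast, PySem.Str.pyGet?_natCast]
  have hFf : ((fun index => PySem.Str.slice t (some index) (some (index + 2)))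
        ∘ fun (k : Nat) => (0 : Int) + (k : Int))
      = fun (k : Nat) => String.ofList ((t.toList.drop k).take 2) := by
    funext k
    simp only [Function.comp_apply, zero_add]
    have h2 : (k : Int) + 2 = ((k : Int)) + ((2 : Nat) : Int) := by push_cast; ring
    have htl : (PySem.Str.slice t (some (k : Int)) (some ((k : Int) + 2))).toList
        = (t.toList.drop k).take 2 := by
      rw [PySem.Str.toList_slice, PySem.Chars.slice_eq_listSlice, h2, PySem.List.slice_natCast_add]
    conv_lhs => rw [← String.ofList_toList (s := PySem.Str.slice t (some (k : Int)) (some ((k : Int) + 2)))]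
    rw [htl]
  rw [hPf, hFf, pvPairs_eq_ranges]

-- runs: a run of length k+1 of character c yields k adjacent pairs
theorem pvHead_dropWhile (p : α → Bool) : ∀ (l : List α) (x : α),
    (l.dropWhile p).head? = some x → p x = false := by
  intro l
  induction l with
  | nil => intro x h; simp [List.dropWhile] at h
  | cons a t ih =>
    intro x h
    rw [List.dropWhile_cons] at h
    by_cases ha : p a
    · exact ih x (by simpa [ha] using h)
    · simp [ha] at h
      subst h
      simpa using ha

theorem pvPairs_replicate (c : Char) (rest : List Char)
    (h : ∀ x, rest.head? = some x → x ≠ c) :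
    ∀ k, pvPairs (List.replicate (k+1) c ++ rest)
      = List.replicate k (String.ofList [c, c]) ++ pvPairs rest := by
  intro k
  induction k with
  | zero =>
    cases rest with
    | nil => simp [pvPairs]
    | cons b r =>
      have hb : ¬ (c == b) = true := by
        intro hcb
        exact h b rfl (beq_iff_eq.mp hcb).symm
      simp [pvPairs, hb]
  | succ k ih =>
    have : List.replicate (k + 1 + 1) c ++ rest = c :: c :: (List.replicate k c ++ rest) := by
      simp [List.replicate_succ]
    rw [this]
    have hmid : c :: (List.replicate k c ++ rest) = List.replicate (k + 1) c ++ rest := by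
      simp [List.replicate_succ]
    show (if c == c then [String.ofList [c, c]] else []) ++ pvPairs (c :: (List.replicate k c ++ rest)) = _
    rw [hmid, ih]
    simp [List.replicate_succ]

theorem pvPairs_runs (l : List Char) :
    pvPairs l = (pvRuns l).flatMap (fun r => List.replicate (r.2 - 1) (String.ofList [r.1, r.1])) := by
  induction l using pvRuns.induct with
  | case1 => simp [pvPairs, pvRuns]
  | case2 c rest ih =>
    have hs : rest.takeWhile (· == c) = List.replicate (rest.takeWhile (· == c)).length c := by
      apply List.eq_replicate_of_mem
      intro x hx
      have hxb := List.mem_takeWhile_imp hx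
      simpa using hxb
    have hsplit : c :: rest = List.replicate ((rest.takeWhile (· == c)).length + 1) c
        ++ rest.dropWhile (· == c) := by
      conv_lhs => rw [← List.takeWhile_append_dropWhile (p := (· == c)) (l := rest)]
      rw [List.replicate_succ]
      simp only [List.cons_append]
      congr 1
      conv_lhs => rw [hs]
    have hruns : pvRuns (c :: rest)
        = (c, (rest.takeWhile (· == c)).length + 1) :: pvRuns (rest.dropWhile (· == c)) := by
      rw [pvRuns.eq_def]
    conv_lhs => rw [hsplit]
    rw [pvPairs_replicate c (rest.dropWhile (· == c))
      (fun x hx => by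
        have hfalse := pvHead_dropWhile (· == c) rest x hx
        intro hxc
        subst hxc
        simp at hfalse)]
    rw [ih, hruns]
    simp

-- Counter arithmetic: k single increments collapse to one += k
theorem pvModifyModify (d : PySem.Dict String Int) (s : String) (a b : Int) :
    (d.modify s 0 (· + a)).modify s 0 (· + b) = d.modify s 0 (· + (a + b)) := by
  simp only [PySem.Dict.modify]
  rw [PySem.Dict.getD_insert_self, PySem.Dict.insert_insert_self, add_assoc]

theorem pvRepFold (s : String) : ∀ (k : Nat) (d : PySem.Dict String Int),
    (List.replicate k s).foldl (fun d x => d.modify x 0 (· + 1)) d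
      = if k = 0 then d else d.modify s 0 (· + (k : Int)) := by
  intro k
  induction k with
  | zero => intro d; simp
  | succ k ih =>
    intro d
    rw [List.replicate_succ, List.foldl_cons, ih]
    by_cases hk : k = 0
    · subst hk; simp
    · rw [if_neg hk, if_neg (by omega), pvModifyModify]
      congr 1
      funext x
      push_cast
      ring

theorem pvCounterEq (l : List Char) :
    PySem.Dict.counter (pvPairs l)
      = (pvRuns l).foldl
          (fun counter r =>
            if 1 < r.2 then counter.modify (String.ofList [r.1, r.1]) 0 (· + ((r.2 : Int) - 1))
            else counter)
          PySem.Dict.empty := by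
  rw [pvPairs_runs, PySem.Dict.counter_eq_foldl, List.foldl_flatMap]
  congr 1
  funext d r
  rw [pvRepFold]
  rcases r with ⟨c, k⟩
  match k with
  | 0 => simp
  | 1 => simp
  | Nat.succ (Nat.succ k) =>
    rw [if_neg (by omega), if_pos (by omega)]
    congr 1
    funext x
    push_cast [Nat.succ_sub_one]
    ring

-- ===== VERDICT (by name: the statement is the Claim_ definition above) =====
theorem frequent_double_letters_spec : Claim_equal_frequent_double_letters := by
  intro text _
  unfold Spec_frequent_double_letters
  show frequent_double_letters text = frequent_double_letters_alt text
  simp only [frequent_double_letters, frequent_double_letters_alt]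
  rw [pvDoubles, pvPrepare_toList, pvCounterEq]
  rfl
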